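-- pv_equiv track=rewrite | github.com/gronendael/football_card_game | tools/generate_game_data.py | coach_play_pools
-- ===== SOURCE A (Python) =====
-- REQ_KEYS = {
--     "kickoff": lambda ps: [k for k, v in ps.items() if v.get("play_type") == "kickoff"],
--     "kickoff_return": lambda ps: [k for k, v in ps.items() if v.get("play_type") == "kickoff_return"],
--     "punt": lambda ps: [k for k, v in ps.items() if v.get("play_type") == "punt"],
--     "punt_return": lambda ps: [k for k, v in ps.items() if v.get("play_type") == "punt_return"],
--     "spot_kick": lambda ps: [k for k, v in ps.items() if v.get("play_type") == "spot_kick"],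
--     "fg_xp_def": lambda ps: [k for k, v in ps.items() if v.get("play_type") == "fg_xp_def"],
-- }
--
-- def coach_play_pools(plays):
--     """Each coach: pools for attachment (not duplicated across coaches by generation)."""
--     run_o = [f"run_{i:02d}" for i in range(1, 13)]
--     pass_o = [f"pass_{i:02d}" for i in range(1, 13)]
--     rd = [f"run_def_{i:02d}" for i in range(1, 13)]
--     pd = [f"pass_def_{i:02d}" for i in range(1, 13)]
--     kk = REQ_KEYS["kickoff"](plays)
--     kr = REQ_KEYS["kickoff_return"](plays)
--     pt = REQ_KEYS["punt"](plays)
--     pr = REQ_KEYS["punt_return"](plays)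
--     sk = REQ_KEYS["spot_kick"](plays)
--     fx = REQ_KEYS["fg_xp_def"](plays)
--     return run_o, pass_o, rd, pd, kk, kr, pt, pr, sk, fx
-- ===== SOURCE B (Python) =====
-- def coach_play_pools(plays):
--     """Each coach: pools for attachment (not duplicated across coaches by generation)."""
--     run_o = [f"run_{i:02d}" for i in range(1, 13)]
--     pass_o = [f"pass_{i:02d}" for i in range(1, 13)]
--     rd = [f"run_def_{i:02d}" for i in range(1, 13)]
--     pd = [f"pass_def_{i:02d}" for i in range(1, 13)]
--     kk, kr, pt, pr, sk, fx = [], [], [], [], [], []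
--     buckets = {"kickoff": kk, "kickoff_return": kr, "punt": pt,
--                "punt_return": pr, "spot_kick": sk, "fg_xp_def": fx}
--     for k, v in plays.items():
--         t = v.get("play_type")
--         if t in buckets:
--             buckets[t].append(k)
--     return run_o, pass_o, rd, pd, kk, kr, pt, pr, sk, fx
-- ===== Notes on version B (the rewrite author's own statement) =====
-- stated objective: simpler
-- what changed: Replaces six separate full scans of plays (one per play_type) with a single pass that dispatches each key into one of six bucket lists via a dict keyed by play_type.
import Mathlib
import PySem

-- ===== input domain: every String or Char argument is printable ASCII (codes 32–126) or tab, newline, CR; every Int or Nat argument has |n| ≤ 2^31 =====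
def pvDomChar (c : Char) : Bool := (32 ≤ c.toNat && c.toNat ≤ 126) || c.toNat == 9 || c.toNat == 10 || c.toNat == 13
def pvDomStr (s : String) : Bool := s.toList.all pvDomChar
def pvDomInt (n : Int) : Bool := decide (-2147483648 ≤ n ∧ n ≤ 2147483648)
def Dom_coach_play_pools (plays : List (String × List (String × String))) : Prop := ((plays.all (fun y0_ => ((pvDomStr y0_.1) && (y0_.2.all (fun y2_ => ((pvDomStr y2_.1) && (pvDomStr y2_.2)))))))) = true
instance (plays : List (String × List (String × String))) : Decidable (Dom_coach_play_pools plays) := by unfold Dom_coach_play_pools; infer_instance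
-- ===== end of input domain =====

-- B: one pass over plays dispatching keys into six buckets, instead of A's six separate scans (simpler decomposition; return value only).

-- ===== PORT A =====
-- f"..._{i:02d}" for i in 1..12: zero-pad to width 2 (exact on this range since 1 ≤ i ≤ 12)
def pvPad2 (i : Int) : String := (if i < 10 then "0" else "") ++ PySem.Int.toStr i

-- REQ_KEYS[t](ps) = [k for k, v in ps.items() if v.get("play_type") == t]
def pvReqKeys (t : String) (ps : List (String × List (String × String))) : List String :=
  (ps.filter (fun kv => (PySem.Dict.mk kv.2).get? "play_type" == some t)).map Prod.fst

def coach_play_pools (plays : List (String × List (String × String))) : List String × List String × List String × List String × List String × List String × List String × List String × List String × List String :=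
  let run_o := (PySem.List.pyRange 1 13 1).map (fun i => "run_" ++ pvPad2 i)
  let pass_o := (PySem.List.pyRange 1 13 1).map (fun i => "pass_" ++ pvPad2 i)
  let rd := (PySem.List.pyRange 1 13 1).map (fun i => "run_def_" ++ pvPad2 i)
  let pd := (PySem.List.pyRange 1 13 1).map (fun i => "pass_def_" ++ pvPad2 i)
  let kk := pvReqKeys "kickoff" plays
  let kr := pvReqKeys "kickoff_return" plays
  let pt := pvReqKeys "punt" plays
  let pr := pvReqKeys "punt_return" plays
  let sk := pvReqKeys "spot_kick" plays
  let fx := pvReqKeys "fg_xp_def" plays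
  (run_o, pass_o, rd, pd, kk, kr, pt, pr, sk, fx)

-- ===== PORT B =====
-- the single loop: "for k, v in plays.items(): t = v.get('play_type'); if t in buckets: buckets[t].append(k)"
-- (the dict dispatch becomes a case split on t over the six fixed keys)
def pvLoop (plays : List (String × List (String × String))) (kk kr pt pr sk fx : List String) : List String × List String × List String × List String × List String × List String :=
  match plays with
  | [] => (kk, kr, pt, pr, sk, fx)
  | (k, v) :: rest =>
    let t := (PySem.Dict.mk v).get? "play_type"
    if t == some "kickoff" then pvLoop rest (kk ++ [k]) kr pt pr sk fx
    else if t == some "kickoff_return" then pvLoop rest kk (kr ++ [k]) pt pr sk fx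
    else if t == some "punt" then pvLoop rest kk kr (pt ++ [k]) pr sk fx
    else if t == some "punt_return" then pvLoop rest kk kr pt (pr ++ [k]) sk fx
    else if t == some "spot_kick" then pvLoop rest kk kr pt pr (sk ++ [k]) fx
    else if t == some "fg_xp_def" then pvLoop rest kk kr pt pr sk (fx ++ [k])
    else pvLoop rest kk kr pt pr sk fx

def coach_play_pools_alt (plays : List (String × List (String × String))) : List String × List String × List String × List String × List String × List String × List String × List String × List String × List String :=
  let run_o := (PySem.List.pyRange 1 13 1).map (fun i => "run_" ++ pvPad2 i)
  let pass_o := (PySem.List.pyRange 1 13 1).map (fun i => "pass_" ++ pvPad2 i)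
  let rd := (PySem.List.pyRange 1 13 1).map (fun i => "run_def_" ++ pvPad2 i)
  let pd := (PySem.List.pyRange 1 13 1).map (fun i => "pass_def_" ++ pvPad2 i)
  let (kk, kr, pt, pr, sk, fx) := pvLoop plays [] [] [] [] [] []
  (run_o, pass_o, rd, pd, kk, kr, pt, pr, sk, fx)

-- ===== PRECONDITION & SPEC =====
def Spec_coach_play_pools (plays : List (String × List (String × String))) (out : List String × List String × List String × List String × List String × List String × List String × List String × List String × List String) : Prop := out = coach_play_pools_alt plays
instance (plays : List (String × List (String × String))) (out : List String × List String × List String × List String × List String × List String × List String × List String × List String × List String) : Decidable (Spec_coach_play_pools plays out) := by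
  unfold Spec_coach_play_pools
  have h2 : DecidableEq (List String × List String) := inferInstance
  have h3 : DecidableEq (List String × List String × List String) := inferInstance
  have h4 : DecidableEq (List String × List String × List String × List String) := inferInstance
  have h5 : DecidableEq (List String × List String × List String × List String × List String) := inferInstance
  have h6 : DecidableEq (List String × List String × List String × List String × List String × List String) := inferInstance
  have h7 : DecidableEq (List String × List String × List String × List String × List String × List String × List String) := inferInstance
  have h8 : DecidableEq (List String × List String × List String × List String × List String × List String × List String × List String) := inferInstance
  have h9 : DecidableEq (List String × List String × List String × List String × List String × List String × List String × List String × List String) := inferInstance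
  have h10 : DecidableEq (List String × List String × List String × List String × List String × List String × List String × List String × List String × List String) := inferInstance
  exact h10 _ _

-- ===== CLAIM (what is proved, stated in full; the proofs are below) =====
def Claim_equal_coach_play_pools : Prop := ∀ (plays : List (String × List (String × String))), Dom_coach_play_pools plays → Spec_coach_play_pools plays (coach_play_pools plays)

-- ===== LEMMAS AND PROOFS =====

-- ===== VERDICT (by name: the statement is the Claim_ definition above) =====
-- loop invariant: pvLoop appends to each accumulator exactly the keys whose play_type matches
theorem pvLoop_eq (plays : List (String × List (String × String))) (kk kr pt pr sk fx : List String) :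
    pvLoop plays kk kr pt pr sk fx =
      (kk ++ pvReqKeys "kickoff" plays, kr ++ pvReqKeys "kickoff_return" plays,
       pt ++ pvReqKeys "punt" plays, pr ++ pvReqKeys "punt_return" plays,
       sk ++ pvReqKeys "spot_kick" plays, fx ++ pvReqKeys "fg_xp_def" plays) := by
  induction plays generalizing kk kr pt pr sk fx with
  | nil => simp [pvLoop, pvReqKeys]
  | cons hd tl ih =>
    obtain ⟨k, v⟩ := hd
    simp only [pvLoop]
    split_ifs with h1 h2 h3 h4 h5 h6 <;>
      simp_all [pvReqKeys]

theorem coach_play_pools_spec : Claim_equal_coach_play_pools := by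
  intro plays _
  unfold Spec_coach_play_pools coach_play_pools coach_play_pools_alt
  simp [pvLoop_eq]
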